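-- pv_equiv track=rewrite | github.com/siliunobi/DNS-Maude | Maude/attack-exploration/src/utils.py | get_domain_prefixes1
-- ===== SOURCE A (Python) =====
-- def get_domain_prefixes1(domain: str):
--     """
--     Returns all prefixes of the given domain.
--     For example, on input 'www.example.com.' this returns ['', 'com.', 'example.com.', 'www.example.com.'].
--     """
--     labels = domain.split('.')
--
--     current = ''
--     prefixes = [current]
--     for label in reversed(labels[:-1]):
--         current = f'{label}.{current}'
--         prefixes.append(current)
--
--     return prefixes
-- ===== SOURCE B (Python) =====
-- def get_domain_prefixes1(domain: str):
--     L = domain.split('.')[:-1]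
--     return [''] + ['.'.join(L[i:]) + '.' for i in reversed(range(len(L)))]
-- ===== Notes on version B (the rewrite author's own statement) =====
-- stated objective: alternative
-- what changed: Each prefix is built independently as a '.'-join over a suffix slice of the label list (comprehension over reversed indices), instead of threading an accumulator string through a loop and appending to a growing list.
import Mathlib
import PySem

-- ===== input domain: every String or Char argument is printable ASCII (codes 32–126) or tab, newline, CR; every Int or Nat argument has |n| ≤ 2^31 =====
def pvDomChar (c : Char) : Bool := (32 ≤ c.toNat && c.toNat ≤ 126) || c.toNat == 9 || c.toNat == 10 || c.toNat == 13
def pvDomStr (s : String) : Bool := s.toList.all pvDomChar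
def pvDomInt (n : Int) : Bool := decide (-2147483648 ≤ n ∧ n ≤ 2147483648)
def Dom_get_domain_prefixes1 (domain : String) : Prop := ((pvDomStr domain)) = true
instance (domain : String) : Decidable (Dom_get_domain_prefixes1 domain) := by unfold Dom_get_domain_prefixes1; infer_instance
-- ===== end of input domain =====

-- B builds each prefix independently as a dot-join over a suffix slice of the label list
-- instead of A's accumulator string threaded through a loop (objective: alternative, same cost).

-- ===== PORT A =====
-- one loop step of A: current = f'{label}.{current}'; prefixes.append(current)
def pvStepA (st : List Char × List (List Char)) (label : List Char) : List Char × List (List Char) :=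
  let current := label ++ '.' :: st.1
  (current, st.2 ++ [current])

def get_domain_prefixes1 (domain : String) : List String :=
  let labels := PySem.Chars.splitOn domain.toList ['.']
  -- for label in reversed(labels[:-1]): …  (labels[:-1] is the slice to -1)
  let res := ((PySem.List.slice labels none (some (-1))).reverse).foldl pvStepA ([], [[]])
  res.2.map String.ofList

-- ===== PORT B =====
def get_domain_prefixes1_alt (domain : String) : List String :=
  let L := PySem.List.slice (PySem.Chars.splitOn domain.toList ['.']) none (some (-1))
  "" :: ((PySem.List.pyRange 0 (PySem.List.len L) 1).reverse.map
    (fun i => String.ofList (PySem.Chars.join ['.'] (PySem.List.slice L (some i) none) ++ ['.'])))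

-- ===== PRECONDITION & SPEC =====
def Spec_get_domain_prefixes1 (domain : String) (out : List String) : Prop := out = get_domain_prefixes1_alt domain
instance (domain : String) (out : List String) : Decidable (Spec_get_domain_prefixes1 domain out) := by unfold Spec_get_domain_prefixes1; infer_instance

-- ===== CLAIM (what is proved, stated in full; the proofs are below) =====
def Claim_equal_get_domain_prefixes1 : Prop := ∀ (domain : String), Dom_get_domain_prefixes1 domain → Spec_get_domain_prefixes1 domain (get_domain_prefixes1 domain)

-- ===== LEMMAS AND PROOFS =====

-- the accumulated string after processing ls right-to-left, starting from c
def pvAccF (ls : List (List Char)) (c : List Char) : List Char :=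
  ls.foldr (fun l acc => l ++ '.' :: acc) c

theorem pvAccF_nonempty (ls : List (List Char)) (h : ls ≠ []) :
    pvAccF ls [] = PySem.Chars.join ['.'] ls ++ ['.'] := by
  induction ls with
  | nil => cases h rfl
  | cons a t ih =>
    cases t with
    | nil => simp [pvAccF, PySem.Chars.join_singleton]
    | cons b u =>
      rw [PySem.Chars.join_cons_cons]
      have := ih (by simp)
      simp [pvAccF] at this ⊢
      simp [this]

theorem pvFoldA_char (ls : List (List Char)) (c : List Char) (ps : List (List Char)) :
    ls.reverse.foldl pvStepA (c, ps) =
      (pvAccF ls c,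
       ps ++ ((List.range ls.length).reverse.map (fun i => pvAccF (ls.drop i) c))) := by
  induction ls generalizing ps with
  | nil => simp [pvAccF]
  | cons a t ih =>
    have hrange : (List.range (t.length + 1)).reverse
        = (List.range t.length).reverse.map Nat.succ ++ [0] := by
      rw [List.range_succ_eq_map]
      simp
    rw [List.reverse_cons, List.foldl_append, ih]
    simp only [List.foldl_cons, List.foldl_nil, pvStepA, Prod.mk.injEq]
    constructor
    · simp [pvAccF]
    · rw [List.length_cons, hrange, List.map_append, List.map_map]
      simp only [List.map_cons, List.map_nil]
      simp [pvAccF, List.append_assoc]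

-- ===== VERDICT (by name: the statement is the Claim_ definition above) =====
theorem get_domain_prefixes1_spec : Claim_equal_get_domain_prefixes1 := by
  intro domain _
  show _ = _
  simp only [get_domain_prefixes1, get_domain_prefixes1_alt]
  set L := PySem.List.slice (PySem.Chars.splitOn domain.toList ['.']) none (some (-1)) with hL
  rw [pvFoldA_char]
  simp only [PySem.List.len_eq]
  rw [PySem.List.pyRange_zero_natCast, ← List.map_reverse, List.map_map]
  simp only [List.map_map, List.map_cons, List.singleton_append]
  congr 1
  apply List.map_congr_left
  intro i hi
  have hi' : i < L.length := by
    have := List.mem_reverse.mp hi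
    simpa using List.mem_range.mp this
  simp only [Function.comp, PySem.List.slice_from_natCast]
  rw [pvAccF_nonempty]
  intro h
  have : L.length ≤ i := by
    have := congrArg List.length h
    simp at this
    omega
  omega
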